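-- pv_equiv track=rewrite | github.com/dabrewskie/owens-lifeos | scripts/memory_expander.py | extract_cop_summary
-- ===== SOURCE A (Python) =====
-- MAX_COP_LINES = 150       # Executive summary from COP
--
-- def extract_cop_summary(cop_content):
--     """Extract the executive-level sections from COP.md."""
--     if not cop_content:
--         return "COP: unavailable"
--
--     lines = cop_content.split('\n')
--     summary_lines = []
--     in_section = False
--     section_count = 0
--
--     # Extract: header, CCIR, Action Items, Cross-Domain Flags, Blind Spots
--     priority_headers = [
--         'CCIR', 'ACTION ITEMS', 'CROSS-DOMAIN', 'BLIND SPOTS', 'SWOT',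
--         '90-DAY HORIZON', 'S4', 'MEDICAL', 'S6'
--     ]
--
--     for line in lines:
--         # Always include top-level headers
--         if line.startswith('# ') or line.startswith('## '):
--             header_text = line.upper()
--             if any(h in header_text for h in priority_headers):
--                 in_section = True
--                 section_count = 0
--                 summary_lines.append(line)
--                 continue
--             else:
--                 in_section = False
--                 continue
--
--         if in_section and section_count < 30:
--             summary_lines.append(line)
--             section_count += 1
--
--     return '\n'.join(summary_lines[:MAX_COP_LINES])
-- ===== SOURCE B (Python) =====
-- MAX_COP_LINES = 150       # Executive summary from COP
--
-- PRIORITY_HEADERS = [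
--     'CCIR', 'ACTION ITEMS', 'CROSS-DOMAIN', 'BLIND SPOTS', 'SWOT',
--     '90-DAY HORIZON', 'S4', 'MEDICAL', 'S6'
-- ]
--
--
-- def _is_header(line):
--     return line.startswith('# ') or line.startswith('## ')
--
--
-- def extract_cop_summary(cop_content):
--     """Extract the executive-level sections from COP.md."""
--     if not cop_content:
--         return "COP: unavailable"
--
--     lines = cop_content.split('\n')
--     n = len(lines)
--
--     # Pass 1: group the document into (header, body-lines) sections.
--     sections = []
--     i = 0
--     while i < n:
--         if _is_header(lines[i]):
--             j = i + 1
--             while j < n and not _is_header(lines[j]):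
--                 j += 1
--             sections.append((lines[i], lines[i + 1:j]))
--             i = j
--         else:
--             i += 1
--
--     # Pass 2: emit each priority section's header plus first 30 body lines.
--     out = []
--     for header, body in sections:
--         header_text = header.upper()
--         if any(h in header_text for h in PRIORITY_HEADERS):
--             out.append(header)
--             out.extend(body[:30])
--
--     return '\n'.join(out[:MAX_COP_LINES])
-- ===== Notes on version B (the rewrite author's own statement) =====
-- stated objective: alternative
-- what changed: Replaced A's single inline flag/counter loop with a two-pass decomposition: first group the lines into (header, body) sections, then emit each priority section's header plus its first 30 body lines, truncating the flattened result to 150 lines.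
import Mathlib
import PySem

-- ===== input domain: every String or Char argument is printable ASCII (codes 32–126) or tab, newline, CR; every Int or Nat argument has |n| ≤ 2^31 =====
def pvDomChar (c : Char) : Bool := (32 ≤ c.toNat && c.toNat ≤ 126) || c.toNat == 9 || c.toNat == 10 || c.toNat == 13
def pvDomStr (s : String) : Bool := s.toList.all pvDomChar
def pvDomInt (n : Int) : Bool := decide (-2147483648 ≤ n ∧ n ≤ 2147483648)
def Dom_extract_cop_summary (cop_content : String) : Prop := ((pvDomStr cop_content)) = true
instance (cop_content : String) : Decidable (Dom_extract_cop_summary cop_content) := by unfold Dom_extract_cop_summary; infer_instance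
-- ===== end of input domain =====

-- B replaces A's inline flag/counter loop by a two-pass decomposition (sectionize, then emit priority sections); same cost, proved equal.


-- ===== PORT A =====
-- shared module constant: the priority keyword list
def pvPriorityHeaders : List String :=
  ["CCIR", "ACTION ITEMS", "CROSS-DOMAIN", "BLIND SPOTS", "SWOT",
   "90-DAY HORIZON", "S4", "MEDICAL", "S6"]

-- line.startswith('# ') or line.startswith('## ')
def pvIsHeader (l : String) : Bool :=
  PySem.Str.startswith l "# " || PySem.Str.startswith l "## "

-- any(h in line.upper() for h in priority_headers)
def pvIsPriority (l : String) : Bool :=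
  pvPriorityHeaders.any (fun h => PySem.Str.isIn h (PySem.Str.upper l))

-- A's for-loop over the lines, state = (summary_lines, in_section, section_count)
def pvLoopA : List String → List String → Bool → Int → List String
  | [], acc, _, _ => acc
  | l :: rest, acc, inSec, cnt =>
    if pvIsHeader l then
      if pvIsPriority l then pvLoopA rest (acc ++ [l]) true 0
      else pvLoopA rest acc false cnt
    else if inSec && decide (cnt < 30) then pvLoopA rest (acc ++ [l]) inSec (cnt + 1)
    else pvLoopA rest acc inSec cnt

def extract_cop_summary (cop_content : String) : String :=
  if cop_content = "" then "COP: unavailable"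
  else
    -- split('\n'): sep is the nonempty literal "\n", so split? is always `some`
    let lines := (PySem.Str.split? cop_content "\n").getD []
    PySem.Str.join "\n" ((pvLoopA lines [] false 0).take 150)

-- ===== PORT B =====
-- pass 1 of Source B: group lines into (header, body) sections; lines before the first header are skipped
def pvSections : List String → List (String × List String)
  | [] => []
  | l :: rest =>
    if pvIsHeader l then
      (l, rest.takeWhile (fun x => !pvIsHeader x)) ::
        pvSections (rest.dropWhile (fun x => !pvIsHeader x))
    else pvSections rest
  termination_by lines => lines.length
  decreasing_by
    · calc (rest.dropWhile fun x => !pvIsHeader x).length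
          ≤ rest.length := List.length_dropWhile_le _ _
        _ < (l :: rest).length := by simp
    · simp

-- pass 2 of Source B: emit header + first 30 body lines of each priority section
def pvEmit (secs : List (String × List String)) : List String :=
  secs.flatMap (fun p => if pvIsPriority p.1 then p.1 :: p.2.take 30 else [])

def extract_cop_summary_alt (cop_content : String) : String :=
  if cop_content = "" then "COP: unavailable"
  else
    let lines := (PySem.Str.split? cop_content "\n").getD []
    PySem.Str.join "\n" ((pvEmit (pvSections lines)).take 150)

-- ===== PRECONDITION & SPEC =====
def Spec_extract_cop_summary (cop_content : String) (out : String) : Prop := out = extract_cop_summary_alt cop_content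
instance (cop_content : String) (out : String) : Decidable (Spec_extract_cop_summary cop_content out) := by unfold Spec_extract_cop_summary; infer_instance

-- ===== CLAIM (what is proved, stated in full; the proofs are below) =====
def Claim_equal_extract_cop_summary : Prop := ∀ (cop_content : String), Dom_extract_cop_summary cop_content → Spec_extract_cop_summary cop_content (extract_cop_summary cop_content)

-- ===== LEMMAS AND PROOFS =====

-- one-step unfolding of the two loops (cited by the proofs below)
theorem pvLoopA_cons (l : String) (rest acc : List String) (inSec : Bool) (cnt : Int) :
    pvLoopA (l :: rest) acc inSec cnt =
      if pvIsHeader l then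
        if pvIsPriority l then pvLoopA rest (acc ++ [l]) true 0
        else pvLoopA rest acc false cnt
      else if inSec && decide (cnt < 30) then pvLoopA rest (acc ++ [l]) inSec (cnt + 1)
      else pvLoopA rest acc inSec cnt := rfl

theorem pvSections_cons (l : String) (rest : List String) :
    pvSections (l :: rest) =
      if pvIsHeader l then
        (l, rest.takeWhile (fun x => !pvIsHeader x)) ::
          pvSections (rest.dropWhile (fun x => !pvIsHeader x))
      else pvSections rest := by
  rw [pvSections.eq_def]

-- pvSections skips leading non-header lines
theorem pvSections_dropWhile (lines : List String) :
    pvSections (lines.dropWhile (fun x => !pvIsHeader x)) = pvSections lines := by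
  induction lines with
  | nil => rfl
  | cons l rest ih =>
    by_cases h : pvIsHeader l
    · simp [h]
    · rw [List.dropWhile_cons, if_pos (by simp [h]), ih, pvSections_cons, if_neg h]

-- the loop of A computes, from any state, acc ++ (what B emits), where the in-section state
-- contributes the remaining (30 - cnt) body lines of the current section
theorem pvLoopA_spec : ∀ (lines acc : List String) (cnt : Int),
    (pvLoopA lines acc false cnt = acc ++ pvEmit (pvSections lines)) ∧
    (pvLoopA lines acc true cnt =
      acc ++ (lines.takeWhile (fun x => !pvIsHeader x)).take (30 - cnt).toNat ++
        pvEmit (pvSections (lines.dropWhile (fun x => !pvIsHeader x)))) := by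
  intro lines
  induction lines with
  | nil => intro acc cnt; simp [pvLoopA, pvSections, pvEmit]
  | cons l rest ih =>
    intro acc cnt
    by_cases hh : pvIsHeader l
    · -- a header line: both loop states take the same branch
      have hcommon : ∀ b : Bool, pvLoopA (l :: rest) acc b cnt =
          acc ++ pvEmit (pvSections (l :: rest)) := by
        intro b
        rw [pvLoopA_cons, if_pos hh, pvSections_cons, if_pos hh]
        by_cases hp : pvIsPriority l
        · rw [if_pos hp, (ih (acc ++ [l]) 0).2]
          simp [pvEmit, hp]
        · rw [if_neg hp, (ih acc cnt).1]
          simp [pvEmit, hp, pvSections_dropWhile rest]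
      refine ⟨hcommon false, ?_⟩
      rw [hcommon true]
      simp [hh]
    · -- a body line
      have htw : (l :: rest).takeWhile (fun x => !pvIsHeader x) =
          l :: rest.takeWhile (fun x => !pvIsHeader x) := by simp [hh]
      have hdw : (l :: rest).dropWhile (fun x => !pvIsHeader x) =
          rest.dropWhile (fun x => !pvIsHeader x) := by simp [hh]
      have hsec : pvSections (l :: rest) = pvSections rest := by
        rw [pvSections_cons, if_neg hh]
      constructor
      · rw [pvLoopA_cons, if_neg hh, if_neg (by simp), (ih acc cnt).1, hsec]
      · by_cases hc : cnt < 30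
        · rw [pvLoopA_cons, if_neg hh, if_pos (by simp [hc]), (ih (acc ++ [l]) (cnt + 1)).2,
              htw, hdw]
          have ht : (30 - cnt).toNat = (30 - (cnt + 1)).toNat + 1 := by omega
          simp [ht]
        · rw [pvLoopA_cons, if_neg hh, if_neg (by simp [hc]), (ih acc cnt).2, htw, hdw]
          have ht : (30 - cnt).toNat = 0 := by omega
          simp [ht]

-- ===== VERDICT (by name: the statement is the Claim_ definition above) =====
theorem extract_cop_summary_spec : Claim_equal_extract_cop_summary := by
  intro s _
  unfold Spec_extract_cop_summary extract_cop_summary extract_cop_summary_alt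
  by_cases he : s = ""
  · simp [he]
  · simp only [he, if_neg, not_false_iff]
    rw [(pvLoopA_spec ((PySem.Str.split? s "\n").getD []) [] 0).1]
    simp
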